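-- pv_equiv track=rewrite | github.com/henrinikku/tira2021 | viikko2/twochar.py | _count
-- ===== SOURCE A (Python) =====
-- def _count(s: str, n: int):
--     char_count = {}
--     result = 0
--     subs_i = 0
--     subs_l = n
--     for i, c in enumerate(s):
--         if char_count.get(c, 0) == 0:
--             subs_l -= 1
--
--         char_count[c] = char_count.get(c, 0) + 1
--
--         while subs_l < 0:
--             subs_c = s[subs_i]
--             char_count[subs_c] = char_count.get(subs_c, 0) - 1
--             if char_count[subs_c] == 0:
--                 subs_l += 1
--
--             subs_i += 1
--
--         result += i - subs_i + 1
--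
--     return result
-- ===== SOURCE B (Python) =====
-- def _count(s: str, n: int):
--     # Left-anchored: for each start j, count how far the substring can extend
--     # while keeping at most n distinct characters.
--     result = 0
--     for j in range(len(s)):
--         seen = set()
--         for i in range(j, len(s)):
--             seen.add(s[i])
--             if len(seen) > n:
--                 break
--             result += 1
--     return result
-- ===== Notes on version B (the rewrite author's own statement) =====
-- stated objective: simpler
-- what changed: Replaced the right-moving sliding window with its count dict and shrink loop by a plain left-anchored scan: for each start index, extend with a set of seen characters until it exceeds n distinct, counting valid substrings as you go.
import Mathlib
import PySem

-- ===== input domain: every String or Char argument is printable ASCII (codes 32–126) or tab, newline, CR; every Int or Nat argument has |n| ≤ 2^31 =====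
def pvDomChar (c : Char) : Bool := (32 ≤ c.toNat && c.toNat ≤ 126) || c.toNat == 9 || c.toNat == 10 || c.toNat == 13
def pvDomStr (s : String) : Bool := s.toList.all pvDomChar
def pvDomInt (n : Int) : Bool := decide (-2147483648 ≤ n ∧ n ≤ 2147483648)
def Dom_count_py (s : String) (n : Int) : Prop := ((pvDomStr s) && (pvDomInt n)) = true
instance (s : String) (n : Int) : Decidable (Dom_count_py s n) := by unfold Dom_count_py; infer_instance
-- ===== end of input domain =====

-- B replaces A's right-moving sliding window (count dict + shrink loop) by a plain
-- left-anchored scan with a set of seen characters: simpler, not faster.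

-- ===== PORT A =====
def cpGet (cc : PySem.Dict Char Int) (c : Char) : Int := cc.getD c 0

-- the 'while subs_l < 0' loop; fuel makes it total, 'none' = IndexError/fuel exhausted
def cpShrink (s : List Char) : Nat → PySem.Dict Char Int → Int → Int →
    Option (PySem.Dict Char Int × Int × Int)
  | 0, _, _, _ => none
  | fuel+1, cc, si, sl =>
    if sl < 0 then
      match PySem.List.pyGet? s si with
      | none => none
      | some c =>
        let cc' := cc.insert c (cpGet cc c - 1)
        let sl' := if cpGet cc' c = 0 then sl + 1 else sl
        cpShrink s fuel cc' (si + 1) sl'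
    else some (cc, si, sl)

-- one iteration of 'for i, c in enumerate(s)'; state = (char_count, result, subs_i, subs_l)
def cpStep (s : List Char) (st : Option (PySem.Dict Char Int × Int × Int × Int))
    (ic : Int × Char) : Option (PySem.Dict Char Int × Int × Int × Int) :=
  match st with
  | none => none
  | some (cc, result, si, sl) =>
    let sl1 := if cpGet cc ic.2 = 0 then sl - 1 else sl
    let cc1 := cc.insert ic.2 (cpGet cc ic.2 + 1)
    match cpShrink s (s.length + 1) cc1 si sl1 with
    | none => none
    | some (cc2, si2, sl2) => some (cc2, result + (ic.1 - si2 + 1), si2, sl2)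

def count_py (s : String) (n : Int) : Int :=
  match (PySem.List.enumerate s.toList 0).foldl (cpStep s.toList)
      (some (PySem.Dict.empty, 0, 0, n)) with
  | none => 0
  | some (_, result, _, _) => result

-- ===== PORT B =====
-- inner 'for i in range(j, len(s))' over the suffix s[j:], with the seen-set
def cbInner (n : Int) : List Char → PySem.Set Char → Int → Int
  | [], _, acc => acc
  | c :: rest, seen, acc =>
    let seen' := PySem.Set.add seen c
    if n < PySem.Set.len seen' then acc
    else cbInner n rest seen' (acc + 1)

def count_py_alt (s : String) (n : Int) : Int :=
  (List.range s.toList.length).foldl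
    (fun acc j => cbInner n (s.toList.drop j) PySem.Set.empty acc) 0

-- ===== PRECONDITION & SPEC =====
-- Pre_ excludes exactly the inputs on which A raises IndexError (nonempty s with n < 0,
-- where A's shrink loop indexes past the window); A returns on every input Pre_ admits.
def Pre_count_py (s : String) (n : Int) : Prop := s = "" ∨ 0 ≤ n
instance (s : String) (n : Int) : Decidable (Pre_count_py s n) := by unfold Pre_count_py; infer_instance
def pvWitness_count_py : String × Int := ("abcab", 2)

def Spec_count_py (s : String) (n : Int) (out : Int) : Prop := out = count_py_alt s n
instance (s : String) (n : Int) (out : Int) : Decidable (Spec_count_py s n out) := by unfold Spec_count_py; infer_instance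

-- ===== CLAIM (what is proved, stated in full; the proofs are below) =====
def Claim_equal_count_py : Prop := ∀ (s : String) (n : Int), Dom_count_py s n → Pre_count_py s n → Spec_count_py s n (count_py s n)

-- ===== LEMMAS AND PROOFS =====

-- the window s[j:m]
def win (s : List Char) (j m : Nat) : List Char := (s.take m).drop j
-- number of distinct characters
def dct (l : List Char) : Nat := l.toFinset.card
-- 'substring s[j..i] has at most n distinct characters'
def Pb (s : List Char) (n : Int) (j i : Nat) : Bool := (dct (win s j (i+1)) : Int) ≤ n
-- number of valid start positions for end position i
def cnt (s : List Char) (n : Int) (i : Nat) : Nat :=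
  ((Finset.range (i+1)).filter (fun j => Pb s n j i = true)).card

theorem dct_le_of_sublist {l l' : List Char} (h : l.Sublist l') : dct l ≤ dct l' := by
  apply Finset.card_le_card
  intro x hx
  simp only [List.mem_toFinset] at *
  exact h.subset hx

theorem win_cons (s : List Char) (j m : Nat) (hj : j < m) (hm : m ≤ s.length) :
    win s j m = s[j]'(by omega) :: win s (j+1) m := by
  unfold win
  rw [List.drop_eq_getElem_cons (by simp; omega)]
  simp [List.getElem_take]

theorem dct_cons (c : Char) (t : List Char) :
    dct (c :: t) = dct t + (if c ∈ t then 0 else 1) := by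
  unfold dct
  simp only [List.toFinset_cons]
  by_cases h : c ∈ t
  · simp [Finset.insert_eq_self.mpr (List.mem_toFinset.mpr h), h]
  · rw [Finset.card_insert_of_notMem (by simpa using h)]
    simp [h]

theorem shrink_spec (s : List Char) (n : Int) (hn : 0 ≤ n) (m : Nat) (hm : m ≤ s.length) :
    ∀ (fuel a : Nat) (cc : PySem.Dict Char Int),
    a ≤ m → m - a < fuel →
    (∀ c, cpGet cc c = ((win s a m).count c : Int)) →
    (a = 0 ∨ (n : Int) < dct (win s (a-1) m)) →
    -1 ≤ n - dct (win s a m) →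
    ∃ (b : Nat) (cc' : PySem.Dict Char Int), a ≤ b ∧ b ≤ m ∧
      cpShrink s fuel cc (a : Int) (n - dct (win s a m)) =
        some (cc', (b : Int), n - dct (win s b m)) ∧
      (∀ c, cpGet cc' c = ((win s b m).count c : Int)) ∧
      (b = 0 ∨ (n : Int) < dct (win s (b-1) m)) ∧
      (dct (win s b m) : Int) ≤ n := by
  intro fuel
  induction fuel with
  | zero => intro a cc ha hf; omega
  | succ f ih =>
    intro a cc ha hf hcc hmin hsl
    by_cases hneg : n - (dct (win s a m) : Int) < 0
    · -- loop body runs: dct (win s a m) > n... actually n < dct; window nonempty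
      have hdct : (n:Int) < dct (win s a m) := by omega
      have hwa : a < m := by
        by_contra hle
        have : a = m := by omega
        subst this
        have : win s a a = [] := by
          unfold win; simp [List.drop_eq_nil_iff]
        rw [this] at hdct hsl
        simp [dct] at hdct hsl
        omega
      have hget : PySem.List.pyGet? s (a : Int) = some (s[a]'(by omega)) := by
        rw [PySem.List.pyGet?_natCast]
        exact List.getElem?_eq_getElem (by omega)
      have hwin := win_cons s a m hwa hm
      set c := s[a]'(by omega) with hc
      -- counts after decrement
      have hcount : (win s a m).count c = (win s (a+1) m).count c + 1 := by
        rw [hwin]; simp [List.count_cons]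
      unfold cpShrink
      rw [if_pos hneg, hget]
      simp only
      have hccGet : cpGet (cc.insert c (cpGet cc c - 1)) c = ((win s (a+1) m).count c : Int) := by
        show (cc.insert c (cpGet cc c - 1)).getD c 0 = _
        rw [PySem.Dict.getD_insert_self]
        show cpGet cc c - 1 = _
        rw [hcc c, hcount]
        push_cast; ring
      have hcc' : ∀ d, cpGet (cc.insert c (cpGet cc c - 1)) d = ((win s (a+1) m).count d : Int) := by
        intro d
        by_cases hd : d = c
        · subst hd; exact hccGet
        · show (cc.insert c (cpGet cc c - 1)).getD d 0 = _
          rw [PySem.Dict.getD_insert_of_ne _ _ _ hd]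
          rw [show cc.getD d 0 = cpGet cc d from rfl, hcc d]
          congr 1
          rw [hwin, List.count_cons]
          simp [Ne.symm hd]
      have hdsplit : dct (win s a m) = dct (win s (a+1) m) + (if c ∈ win s (a+1) m then 0 else 1) := by
        rw [hwin, dct_cons]
      have hslval : (if cpGet (cc.insert c (cpGet cc c - 1)) c = 0
            then n - (dct (win s a m) : Int) + 1 else n - (dct (win s a m) : Int))
          = n - (dct (win s (a+1) m) : Int) := by
        rw [hccGet]
        by_cases hmem : c ∈ win s (a+1) m
        · rw [if_neg, hdsplit, if_pos hmem]
          · push_cast; ring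
          · have := List.count_pos_iff.mpr hmem
            omega
        · rw [if_pos, hdsplit, if_neg hmem]
          · push_cast; ring
          · rw [List.count_eq_zero.mpr hmem]; rfl
      rw [hslval]
      have hseq : (a : Int) + 1 = ((a + 1 : Nat) : Int) := by push_cast; ring
      rw [hseq]
      have hsl1 : n - (dct (win s a m) : Int) = -1 := by omega
      have hslnew : -1 ≤ n - (dct (win s (a+1) m) : Int) := by
        have := dct_le_of_sublist (l := win s (a+1) m) (l' := win s a m)
          (by rw [hwin]; exact List.sublist_cons_self _ _)
        omega
      obtain ⟨b, cc2, hb1, hb2, heq, h4, h5, h6⟩ :=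
        ih (a+1) (cc.insert c (cpGet cc c - 1)) (by omega) (by omega) hcc'
          (Or.inr (by simpa using hdct)) hslnew
      exact ⟨b, cc2, by omega, hb2, heq, h4, h5, h6⟩
    · refine ⟨a, cc, le_refl _, ha, ?_, hcc, hmin, by omega⟩
      unfold cpShrink
      rw [if_neg hneg]

theorem win_snoc (s : List Char) (j m : Nat) (hj : j ≤ m) (hm : m < s.length) :
    win s j (m+1) = win s j m ++ [s[m]] := by
  unfold win
  rw [List.take_add_one, List.drop_append_of_le_length (by simp; omega)]
  simp [List.getElem?_eq_getElem hm]

theorem win_sub_left (s : List Char) (j j' m : Nat) (h : j ≤ j') :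
    (win s j' m).Sublist (win s j m) := by
  have e : win s j' m = (win s j m).drop (j' - j) := by
    unfold win; rw [List.drop_drop]; congr 1; omega
  rw [e]; exact List.drop_sublist _ _

theorem win_sub_right (s : List Char) (j m m' : Nat) (h : m ≤ m') :
    (win s j m).Sublist (win s j m') := by
  unfold win
  have e : s.take m = (s.take m').take m := by rw [List.take_take, Nat.min_eq_left h]
  rw [e]
  exact (List.take_sublist _ _).drop _

theorem dct_snoc (c : Char) (t : List Char) :
    dct (t ++ [c]) = dct t + (if c ∈ t then 0 else 1) := by
  unfold dct
  rw [List.toFinset_append]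
  by_cases h : c ∈ t
  · have hs : ([c].toFinset : Finset Char) ⊆ t.toFinset := by
      intro x hx
      simp only [List.toFinset_cons, List.toFinset_nil, insert_empty_eq, Finset.mem_singleton] at hx
      subst hx
      exact List.mem_toFinset.mpr h
    simp [h, Finset.union_eq_left.mpr hs]
  · rw [show t.toFinset ∪ [c].toFinset = insert c t.toFinset by simp [Finset.union_comm]]
    rw [Finset.card_insert_of_notMem (by simpa using h)]
    simp [h]

theorem cnt_eq (s : List Char) (n : Int) (hn : 0 ≤ n) (k b : Nat) (hb : b ≤ k + 1)
    (hk : k < s.length)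
    (hbmin : b = 0 ∨ (n : Int) < dct (win s (b-1) (k+1)))
    (hble : (dct (win s b (k+1)) : Int) ≤ n) :
    ((k : Int) - (b : Int) + 1) = (cnt s n k : Int) := by
  have hfe : (Finset.range (k+1)).filter (fun j => Pb s n j k = true) = Finset.Ico b (k+1) := by
    apply Finset.ext
    intro j
    simp only [Finset.mem_filter, Finset.mem_range, Finset.mem_Ico, Pb, decide_eq_true_eq]
    constructor
    · rintro ⟨hj, hP⟩
      refine ⟨?_, hj⟩
      by_contra hjb
      push_neg at hjb
      have hb0 : b ≠ 0 := by omega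
      rcases hbmin with h | h
      · exact hb0 h
      · have := dct_le_of_sublist (win_sub_left s j (b-1) (k+1) (by omega))
        omega
    · rintro ⟨hbj, hj⟩
      refine ⟨hj, ?_⟩
      have := dct_le_of_sublist (win_sub_left s b j (k+1) hbj)
      omega
  unfold cnt
  rw [hfe, Nat.card_Ico]
  omega

theorem loopA (s : List Char) (n : Int) (hn : 0 ≤ n) :
    ∀ (fuel k : Nat) (cc : PySem.Dict Char Int) (res : Int) (a : Nat),
    s.length - k ≤ fuel → k ≤ s.length → a ≤ k →
    (∀ c, cpGet cc c = ((win s a k).count c : Int)) →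
    (a = 0 ∨ (n : Int) < dct (win s (a-1) k)) →
    (dct (win s a k) : Int) ≤ n →
    res = ∑ i ∈ Finset.range k, (cnt s n i : Int) →
    ∃ cc' a' sl',
      (PySem.List.enumerate (s.drop k) (k : Int)).foldl (cpStep s)
          (some (cc, res, (a : Int), n - dct (win s a k)))
        = some (cc', ∑ i ∈ Finset.range s.length, (cnt s n i : Int), a', sl') := by
  intro fuel
  induction fuel with
  | zero =>
    intro k cc res a hf hk ha hcc hmin hle hres
    have : k = s.length := by omega
    subst this
    refine ⟨cc, (a : Int), n - dct (win s a s.length), ?_⟩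
    simp [hres]
  | succ f ih =>
    intro k cc res a hf hk ha hcc hmin hle hres
    by_cases hks : k = s.length
    · subst hks
      refine ⟨cc, (a : Int), n - dct (win s a s.length), ?_⟩
      simp [hres]
    · have hklt : k < s.length := by omega
      set c := s[k]'hklt with hc
      rw [List.drop_eq_getElem_cons hklt, PySem.List.enumerate_cons, List.foldl_cons]
      have hsnoc := win_snoc s a k ha hklt
      -- reduce the step
      have hcount0 : cpGet cc c = ((win s a k).count c : Int) := hcc c
      have hcc1 : ∀ d, cpGet (cc.insert c (cpGet cc c + 1)) d
          = ((win s a (k+1)).count d : Int) := by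
        intro d
        by_cases hd : d = c
        · subst hd
          show (cc.insert c (cpGet cc c + 1)).getD c 0 = _
          rw [PySem.Dict.getD_insert_self, hcc c, hsnoc, List.count_append, hc,
            List.count_singleton]
          simp only [beq_self_eq_true, if_true]
          push_cast; ring
        · show (cc.insert c (cpGet cc c + 1)).getD d 0 = _
          rw [PySem.Dict.getD_insert_of_ne _ _ _ hd,
            show cc.getD d 0 = cpGet cc d from rfl, hcc d, hsnoc]
          simp only [List.count_append, List.count_singleton']
          have : ¬ (s[k]'hklt = d) := by rw [← hc]; exact fun h => hd h.symm
          simp [this]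
      have hdsnoc : dct (win s a (k+1)) = dct (win s a k) + (if c ∈ win s a k then 0 else 1) := by
        rw [hsnoc, dct_snoc]
      have hsl1 : (if cpGet cc c = 0 then n - (dct (win s a k) : Int) - 1
            else n - (dct (win s a k) : Int)) = n - (dct (win s a (k+1)) : Int) := by
        rw [hcount0]
        by_cases hmem : c ∈ win s a k
        · rw [if_neg, hdsnoc, if_pos hmem]
          · push_cast; ring
          · have := List.count_pos_iff.mpr hmem
            omega
        · rw [if_pos, hdsnoc, if_neg hmem]
          · push_cast; ring
          · rw [List.count_eq_zero.mpr hmem]; rfl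
      have hmin1 : a = 0 ∨ (n : Int) < dct (win s (a-1) (k+1)) := by
        rcases hmin with h | h
        · exact Or.inl h
        · exact Or.inr (lt_of_lt_of_le h (by
            exact_mod_cast Int.ofNat_le.mpr (dct_le_of_sublist (win_sub_right s (a-1) k (k+1) (by omega)))))
      have hsl1ge : -1 ≤ n - (dct (win s a (k+1)) : Int) := by
        rw [hdsnoc]
        split_ifs <;> push_cast <;> omega
      obtain ⟨b, cc2, hb1, hb2, heq, h4, h5, h6⟩ :=
        shrink_spec s n hn (k+1) (by omega) (s.length + 1) a
          (cc.insert c (cpGet cc c + 1)) (by omega) (by omega) hcc1 hmin1 hsl1ge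
      have hstep : cpStep s (some (cc, res, (a : Int), n - dct (win s a k))) ((k : Int), c)
          = some (cc2, res + ((k : Int) - (b : Int) + 1), (b : Int), n - dct (win s b (k+1))) := by
        simp only [cpStep]
        rw [hsl1, heq]
      rw [hstep]
      have hresval : res + ((k : Int) - (b : Int) + 1)
          = ∑ i ∈ Finset.range (k+1), (cnt s n i : Int) := by
        rw [Finset.sum_range_succ, hres, cnt_eq s n hn k b hb2 hklt h5 h6]
      rw [hresval, show (k : Int) + 1 = ((k+1 : Nat) : Int) by push_cast; ring]
      exact ih (k+1) cc2 _ b (by omega) (by omega) hb2 h4 h5 h6 rfl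

theorem set_len_eq (t : PySem.Set Char) : PySem.Set.len t = (t.length : Int) := rfl

theorem ico_cons (t m : Nat) (h : t < m) :
    Finset.Ico t m = insert t (Finset.Ico (t+1) m) := by
  apply Finset.ext
  intro x
  simp only [Finset.mem_Ico, Finset.mem_insert]
  omega

theorem innerB (s : List Char) (n : Int) (j : Nat) :
    ∀ (fuel t : Nat) (seen : PySem.Set Char) (acc : Int),
    s.length - t ≤ fuel → j ≤ t → t ≤ s.length →
    seen.Nodup → seen.toFinset = (win s j t).toFinset →
    cbInner n (s.drop t) seen acc
      = acc + (((Finset.Ico t s.length).filter (fun i => Pb s n j i = true)).card : Int) := by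
  intro fuel
  induction fuel with
  | zero =>
    intro t seen acc hf hjt hts hnd htf
    have : t = s.length := by omega
    subst this
    simp [List.drop_length, cbInner]
  | succ f ih =>
    intro t seen acc hf hjt hts hnd htf
    by_cases hts' : t = s.length
    · subst hts'
      simp [List.drop_length, cbInner]
    · have htlt : t < s.length := by omega
      rw [List.drop_eq_getElem_cons htlt]
      show (let seen' := PySem.Set.add seen (s[t]'htlt);
        if n < PySem.Set.len seen' then acc
        else cbInner n (s.drop (t+1)) seen' (acc + 1)) = _
      set c := s[t]'htlt with hc
      have hwsnoc := win_snoc s j t hjt htlt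
      have htf' : (PySem.Set.add seen c).toFinset = (win s j (t+1)).toFinset := by
        rw [PySem.Set.add_eq_ite, hwsnoc]
        by_cases hm : c ∈ seen
        · rw [if_pos hm]
          rw [htf]
          rw [List.toFinset_append]
          have : ([c].toFinset : Finset Char) ⊆ (win s j t).toFinset := by
            intro x hx
            simp only [List.toFinset_cons, List.toFinset_nil, insert_empty_eq,
              Finset.mem_singleton] at hx
            subst hx
            rw [← htf]
            exact List.mem_toFinset.mpr hm
          rw [Finset.union_eq_left.mpr this]
        · rw [if_neg hm]
          rw [List.toFinset_append, List.toFinset_append, htf]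
      have hnd' : (PySem.Set.add seen c).Nodup := PySem.Set.nodup_add _ _ hnd
      have hlen' : PySem.Set.len (PySem.Set.add seen c) = (dct (win s j (t+1)) : Int) := by
        rw [set_len_eq]
        congr 1
        rw [← List.toFinset_card_of_nodup hnd', htf']
        rfl
      by_cases hguard : n < (dct (win s j (t+1)) : Int)
      · rw [if_pos (by rw [hlen']; exact_mod_cast hguard)]
        have hempty : ((Finset.Ico t s.length).filter (fun i => Pb s n j i = true)) = ∅ := by
          apply Finset.filter_eq_empty_iff.mpr
          intro i hi
          simp only [Finset.mem_Ico] at hi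
          simp only [Pb, decide_eq_true_eq, not_le]
          calc n < (dct (win s j (t+1)) : Int) := hguard
            _ ≤ (dct (win s j (i+1)) : Int) := by
                exact_mod_cast Int.ofNat_le.mpr
                  (dct_le_of_sublist (win_sub_right s j (t+1) (i+1) (by omega)))
        rw [hempty]
        simp
      · rw [if_neg (by rw [hlen']; exact_mod_cast hguard)]
        rw [ih (t+1) _ (acc+1) (by omega) (by omega) (by omega) hnd' htf']
        rw [ico_cons t s.length htlt, Finset.filter_insert,
          if_pos (by simp only [Pb, decide_eq_true_eq]; omega),
          Finset.card_insert_of_notMem (by simp)]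
        push_cast
        ring

theorem foldl_addg (g : Nat → Int) (l : List Nat) (f : Int → Nat → Int)
    (hf : ∀ acc x, x ∈ l → f acc x = acc + g x) :
    ∀ a : Int, l.foldl f a = a + (l.map g).sum := by
  induction l with
  | nil => intro a; simp
  | cons x xs ih =>
    intro a
    rw [List.foldl_cons, hf a x (by simp),
      ih (fun acc y hy => hf acc y (by simp [hy])) (a + g x)]
    simp [List.sum_cons]
    ring

theorem map_range_sum (g : Nat → Int) (m : Nat) :
    ((List.range m).map g).sum = ∑ j ∈ Finset.range m, g j := by
  induction m with
  | zero => simp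
  | succ k ih => rw [List.range_succ, Finset.sum_range_succ, List.map_append, List.sum_append, ih]; simp

theorem swap_sum (s : List Char) (n : Int) :
    ∑ i ∈ Finset.range s.length, (cnt s n i : Int)
      = ∑ j ∈ Finset.range s.length,
          ((((Finset.Ico j s.length).filter (fun i => Pb s n j i = true)).card : Nat) : Int) := by
  have L : ∀ i ∈ Finset.range s.length, (cnt s n i : Int)
      = ∑ j ∈ Finset.range s.length,
          (if j ≤ i ∧ Pb s n j i = true then (1 : Int) else 0) := by
    intro i hi
    simp only [Finset.mem_range] at hi
    unfold cnt
    rw [Finset.card_filter]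
    push_cast
    rw [show (∑ j ∈ Finset.range (i+1), if Pb s n j i = true then (1:Int) else 0)
        = ∑ j ∈ Finset.range (i+1), (if j ≤ i ∧ Pb s n j i = true then (1:Int) else 0) from
      Finset.sum_congr rfl (by
        intro j hj
        simp only [Finset.mem_range] at hj
        have hji : j ≤ i := by omega
        by_cases hP : Pb s n j i = true <;> simp [hP, hji])]
    apply Finset.sum_subset
    · intro x hx
      simp only [Finset.mem_range] at hx ⊢
      omega
    · intro x hx1 hx2
      simp only [Finset.mem_range] at hx2
      have hni : ¬ (x ≤ i ∧ Pb s n x i = true) := by rintro ⟨h1, _⟩; omega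
      exact if_neg hni
  have R : ∀ j ∈ Finset.range s.length,
      ((((Finset.Ico j s.length).filter (fun i => Pb s n j i = true)).card : Nat) : Int)
      = ∑ i ∈ Finset.range s.length,
          (if j ≤ i ∧ Pb s n j i = true then (1 : Int) else 0) := by
    intro j hj
    rw [Finset.card_filter]
    push_cast
    rw [show (∑ i ∈ Finset.Ico j s.length, if Pb s n j i = true then (1:Int) else 0)
        = ∑ i ∈ Finset.Ico j s.length, (if j ≤ i ∧ Pb s n j i = true then (1:Int) else 0) from
      Finset.sum_congr rfl (by
        intro i hi
        simp only [Finset.mem_Ico] at hi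
        have hji : j ≤ i := hi.1
        by_cases hP : Pb s n j i = true <;> simp [hP, hji])]
    apply Finset.sum_subset
    · intro x hx
      simp only [Finset.mem_Ico] at hx
      simp only [Finset.mem_range]
      omega
    · intro x hx1 hx2
      simp only [Finset.mem_Ico] at hx2
      simp only [Finset.mem_range] at hx1
      have hni : ¬ (j ≤ x ∧ Pb s n j x = true) := by
        rintro ⟨h1, _⟩
        omega
      exact if_neg hni
  rw [Finset.sum_congr rfl L, Finset.sum_congr rfl R]
  exact Finset.sum_comm

theorem count_py_eq_sum (l : List Char) (n : Int) (hn : 0 ≤ n) :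
    (match (PySem.List.enumerate l 0).foldl (cpStep l) (some (PySem.Dict.empty, 0, 0, n)) with
     | none => 0
     | some (_, r, _, _) => r) = ∑ i ∈ Finset.range l.length, (cnt l n i : Int) := by
  obtain ⟨cc', a', sl', h⟩ := loopA l n hn l.length 0 PySem.Dict.empty 0 0 (by omega) (by omega)
    (by omega)
    (fun c => by simp [cpGet, PySem.Dict.getD_empty, win])
    (Or.inl rfl)
    (by simpa [win, dct] using hn)
    (by simp)
  have e0 : dct (win l 0 0) = 0 := by simp [win, dct]
  rw [e0] at h
  simp only [List.drop_zero, Nat.cast_zero, sub_zero] at h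
  rw [h]

theorem alt_eq_sum (l : List Char) (n : Int) :
    (List.range l.length).foldl (fun acc j => cbInner n (l.drop j) PySem.Set.empty acc) 0
      = ∑ j ∈ Finset.range l.length,
          ((((Finset.Ico j l.length).filter (fun i => Pb l n j i = true)).card : Nat) : Int) := by
  rw [foldl_addg (fun j => ((((Finset.Ico j l.length).filter (fun i => Pb l n j i = true)).card : Nat) : Int))
    (List.range l.length) _ (fun acc j hj => by
      simp only [List.mem_range] at hj
      exact innerB l n j (l.length - j) j PySem.Set.empty acc (by omega) (le_refl j) (by omega)
        (by simp [PySem.Set.empty]) (by simp [PySem.Set.empty, win]) ) 0]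
  rw [map_range_sum]
  simp

-- ===== VERDICT (by name: the statement is the Claim_ definition above) =====
theorem count_py_spec : Claim_equal_count_py := by
  intro s n _ hpre
  unfold Spec_count_py
  rcases hpre with hs | hn
  · subst hs; rfl
  · show count_py s n = count_py_alt s n
    unfold count_py count_py_alt
    rw [count_py_eq_sum s.toList n hn, alt_eq_sum s.toList n, swap_sum]
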